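-- pv_equiv track=rewrite | github.com/Ludoviccccc/IMGEPforMCPusingLLMs | test.py | simulate_dual_core
-- ===== SOURCE A (Python) =====
-- import queue
--
-- def simulate_dual_core(core1_code, core2_code):
--     instruction_times = {"LOAD": 2, "STORE": 2, "ADD": 1, "SUB": 1, "MUL": 3, "DIV": 4}
--
--     core1_queue = queue.Queue()
--     core2_queue = queue.Queue()
--     core1_time = 0
--     core2_time = 0
--
--     # Load instructions into respective core queues
--     for instruction in core1_code:
--         parts = instruction.split()
--         if parts[0] in instruction_times:
--             core1_queue.put(instruction_times[parts[0]])
--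
--     for instruction in core2_code:
--         parts = instruction.split()
--         if parts[0] in instruction_times:
--             core2_queue.put(instruction_times[parts[0]])
--
--     # Simulate execution in parallel
--     while not core1_queue.empty() or not core2_queue.empty():
--         if not core1_queue.empty():
--             core1_time += core1_queue.get()
--         if not core2_queue.empty():
--             core2_time += core2_queue.get()
--
--     return core1_time, core2_time
-- ===== SOURCE B (Python) =====
-- def simulate_dual_core(core1_code, core2_code):
--     instruction_times = {"LOAD": 2, "STORE": 2, "ADD": 1, "SUB": 1, "MUL": 3, "DIV": 4}
--     def core_time(code):
--         return sum(instruction_times.get(instr.split()[0], 0) for instr in code)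
--     return core_time(core1_code), core_time(core2_code)
-- ===== Notes on version B (the rewrite author's own statement) =====
-- stated objective: simpler
-- what changed: Drops both FIFO queues and the parallel draining while-loop; each core's total is computed directly as a sum of dict.get lookups over its code list.
import Mathlib
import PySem

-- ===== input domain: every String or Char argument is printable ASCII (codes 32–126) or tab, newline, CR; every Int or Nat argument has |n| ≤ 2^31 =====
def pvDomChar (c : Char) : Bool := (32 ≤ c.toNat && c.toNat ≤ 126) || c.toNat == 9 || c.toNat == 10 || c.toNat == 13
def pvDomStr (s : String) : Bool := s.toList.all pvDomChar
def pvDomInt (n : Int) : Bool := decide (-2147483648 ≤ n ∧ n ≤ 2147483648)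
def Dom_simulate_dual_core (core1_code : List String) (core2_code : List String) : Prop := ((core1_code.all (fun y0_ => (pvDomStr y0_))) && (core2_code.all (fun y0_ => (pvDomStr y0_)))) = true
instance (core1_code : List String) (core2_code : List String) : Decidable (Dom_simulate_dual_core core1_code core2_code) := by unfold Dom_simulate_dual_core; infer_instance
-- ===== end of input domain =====

-- ===== PORT A =====
-- B changes: the two Queue objects and the draining while-loop are replaced by a direct
-- per-core sum of instruction times (objective: simpler). No argument is mutated.

-- the instruction_times dict of both programs
def instrTimes : PySem.Dict String Int :=
  PySem.Dict.ofList [("LOAD", 2), ("STORE", 2), ("ADD", 1), ("SUB", 1), ("MUL", 3), ("DIV", 4)]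

-- the two queue-loading for-loops of A: put instruction_times[parts[0]] whenever parts[0] is a key
-- (parts[0] = split()[0]; Pre_ guarantees the split is nonempty, so pyGet? is some)
def loadQueue (code : List String) : List Int :=
  code.foldl (fun q instruction =>
    let parts := PySem.Str.split₀ instruction
    match PySem.List.pyGet? parts 0 with
    | none => q          -- unreachable under Pre_ (IndexError in Python)
    | some p =>
      match instrTimes.get? p with
      | some t => q ++ [t]
      | none => q) []

-- A's while-loop: drain both queues in lockstep, accumulating the two times
def drain : List Int → List Int → Int → Int → Int × Int
  | [], [], t1, t2 => (t1, t2)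
  | a :: q1, [], t1, t2 => drain q1 [] (t1 + a) t2
  | [], b :: q2, t1, t2 => drain [] q2 t1 (t2 + b)
  | a :: q1, b :: q2, t1, t2 => drain q1 q2 (t1 + a) (t2 + b)

def simulate_dual_core (core1_code : List String) (core2_code : List String) : Int × Int :=
  drain (loadQueue core1_code) (loadQueue core2_code) 0 0

-- ===== PORT B =====
-- sum(instruction_times.get(instr.split()[0], 0) for instr in code)
def coreTime (code : List String) : Int :=
  (code.map (fun instr =>
    match PySem.List.pyGet? (PySem.Str.split₀ instr) 0 with
    | none => 0          -- unreachable under Pre_ (IndexError in Python)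
    | some p => instrTimes.getD p 0)).sum

def simulate_dual_core_alt (core1_code : List String) (core2_code : List String) : Int × Int :=
  (coreTime core1_code, coreTime core2_code)

-- ===== PRECONDITION & SPEC =====
-- Pre_ excludes exactly the inputs where some instruction is empty or all-whitespace: there
-- instruction.split()[0] raises IndexError in A (and in B alike).
def Pre_simulate_dual_core (core1_code : List String) (core2_code : List String) : Prop :=
  (∀ s ∈ core1_code, PySem.Str.split₀ s ≠ []) ∧ (∀ s ∈ core2_code, PySem.Str.split₀ s ≠ [])
instance (core1_code : List String) (core2_code : List String) : Decidable (Pre_simulate_dual_core core1_code core2_code) := by unfold Pre_simulate_dual_core; infer_instance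

def pvWitness_simulate_dual_core : List String × List String :=
  (["LOAD r1", "NOP", "ADD r1 r2"], ["MUL r3", "DIV r3 r1"])

def Spec_simulate_dual_core (core1_code : List String) (core2_code : List String) (out : Int × Int) : Prop := out = simulate_dual_core_alt core1_code core2_code
instance (core1_code : List String) (core2_code : List String) (out : Int × Int) : Decidable (Spec_simulate_dual_core core1_code core2_code out) := by unfold Spec_simulate_dual_core; infer_instance

-- ===== CLAIM =====
def Claim_equal_simulate_dual_core : Prop := ∀ (core1_code : List String) (core2_code : List String), Dom_simulate_dual_core core1_code core2_code → Pre_simulate_dual_core core1_code core2_code → Spec_simulate_dual_core core1_code core2_code (simulate_dual_core core1_code core2_code)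

-- ===== LEMMAS AND PROOFS =====

-- draining the two queues yields the pair of their sums
theorem drain_eq_sums (q1 q2 : List Int) (t1 t2 : Int) :
    drain q1 q2 t1 t2 = (t1 + q1.sum, t2 + q2.sum) := by
  induction q1 generalizing q2 t1 t2 with
  | nil =>
    induction q2 generalizing t1 t2 with
    | nil => simp [drain]
    | cons b q2 ih => simp [drain, ih]; ring
  | cons a q1 ih =>
    cases q2 with
    | nil => simp [drain, ih]; ring
    | cons b q2 => simp [drain, ih]; exact ⟨by ring, by ring⟩

-- the loaded queue's sum is B's per-core time (on nonempty splits)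
theorem sum_loadQueue (code : List String) (h : ∀ s ∈ code, PySem.Str.split₀ s ≠ []) :
    (loadQueue code).sum = coreTime code := by
  suffices H : ∀ (acc : List Int),
      (code.foldl (fun q instruction =>
        let parts := PySem.Str.split₀ instruction
        match PySem.List.pyGet? parts 0 with
        | none => q
        | some p =>
          match instrTimes.get? p with
          | some t => q ++ [t]
          | none => q) acc).sum = acc.sum + coreTime code by
    simpa [loadQueue] using H []
  induction code with
  | nil => intro acc; simp [coreTime]
  | cons s rest ih =>
    intro acc
    have hs : PySem.Str.split₀ s ≠ [] := h s (by simp)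
    have hrest : ∀ t ∈ rest, PySem.Str.split₀ t ≠ [] := fun t ht => h t (by simp [ht])
    obtain ⟨p, ps, hps⟩ : ∃ p ps, PySem.Str.split₀ s = p :: ps := by
      cases hsp : PySem.Str.split₀ s with
      | nil => exact absurd hsp hs
      | cons p ps => exact ⟨p, ps, rfl⟩
    have ihr := ih hrest
    have hget0 : PySem.List.pyGet? (PySem.Str.split₀ s) 0 = some p := by
      simp [hps, PySem.List.pyGet?, PySem.List.pyIdx?]
    rw [List.foldl_cons]
    simp only [hget0]
    cases hget : instrTimes.get? p with
    | none =>
      rw [ihr acc]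
      simp [coreTime, hget0, PySem.Dict.getD, hget]
    | some t =>
      rw [ihr (acc ++ [t])]
      simp [coreTime, hget0, PySem.Dict.getD, hget]
      ring

-- ===== VERDICT =====
theorem simulate_dual_core_spec : Claim_equal_simulate_dual_core := by
  intro c1 c2 _ hpre
  unfold Spec_simulate_dual_core simulate_dual_core simulate_dual_core_alt
  rw [drain_eq_sums, sum_loadQueue c1 hpre.1, sum_loadQueue c2 hpre.2]
  simp
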